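-- pv_equiv track=rewrite | github.com/dlng23/algorithm-py | problems/week14/2775.py | ab
-- ===== SOURCE A (Python) =====
-- def ab(k, n):
--     ab = [[0] * (n + 1) for _ in range(k + 1)]
--
--     for i in range(1, n + 1):
--         ab[0][i] = i
--
--     for j in range(1, k + 1):
--         for i in range(1, n + 1):
--             ab[j][i] = ab[j][i - 1] + ab[j - 1][i]
--
--     return ab[k][n]
-- ===== SOURCE B (Python) =====
-- def ab(k, n):
--     # Closed-form: the table's corner value is the binomial C(n + k, k + 1),
--     # computed by the standard exact incremental product (O(k) iterations).
--     res = 1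
--     for i in range(1, k + 2):
--         res = res * (n + i - 1) // i
--     return res
-- ===== Notes on version B (the rewrite author's own statement) =====
-- stated objective: faster
-- what changed: Replaces the O(k*n) dynamic-programming table of iterated prefix sums by the closed-form binomial C(n+k, k+1), computed with the exact incremental product in O(k).
import Mathlib
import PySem

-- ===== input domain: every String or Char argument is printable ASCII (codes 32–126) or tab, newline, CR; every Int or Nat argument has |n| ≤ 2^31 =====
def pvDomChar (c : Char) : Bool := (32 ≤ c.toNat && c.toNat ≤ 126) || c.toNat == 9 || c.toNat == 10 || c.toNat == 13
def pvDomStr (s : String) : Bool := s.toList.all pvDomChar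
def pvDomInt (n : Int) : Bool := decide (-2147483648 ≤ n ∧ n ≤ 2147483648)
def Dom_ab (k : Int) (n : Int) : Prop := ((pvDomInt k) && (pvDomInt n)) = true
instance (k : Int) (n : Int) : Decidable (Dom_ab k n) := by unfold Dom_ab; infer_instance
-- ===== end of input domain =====

-- B replaces A's dynamic-programming table by the closed-form binomial C(n+k, k+1),
-- computed with the exact incremental product (the speed objective; equality proved on Pre_ab).

-- ===== PORT A =====
-- Python lists are mutable arrays: the table is an Array of Array rows, cells
-- read/written in place; every access A makes is in range with a nonnegative
-- index under Pre_ab (out-of-range accesses are excluded by Pre_ab)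
def abGet (tbl : Array (Array Int)) (j i : Int) : Int :=
  (tbl.getD j.toNat #[]).getD i.toNat 0

def abSet (tbl : Array (Array Int)) (j i : Int) (v : Int) : Array (Array Int) :=
  tbl.modify j.toNat (fun row => row.setIfInBounds i.toNat v)

def ab (k : Int) (n : Int) : Int :=
  -- ab = [[0] * (n + 1) for _ in range(k + 1)]
  let t0 : Array (Array Int) :=
    ((PySem.List.pyRange 0 (k+1) 1).map (fun _ => Array.replicate (n+1).toNat (0:Int))).toArray
  -- for i in range(1, n + 1): ab[0][i] = i
  let t1 := (PySem.List.pyRange 1 (n+1) 1).foldl (fun t i => abSet t 0 i i) t0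
  -- for j in range(1, k + 1): for i in range(1, n + 1): ab[j][i] = ab[j][i-1] + ab[j-1][i]
  let t2 := (PySem.List.pyRange 1 (k+1) 1).foldl (fun t j =>
      (PySem.List.pyRange 1 (n+1) 1).foldl
        (fun t i =>
          let v := abGet t j (i-1) + abGet t (j-1) i
          abSet t j i v) t) t1
  abGet t2 k n

-- ===== PORT B =====
def ab_alt (k : Int) (n : Int) : Int :=
  (PySem.List.pyRange 1 (k+2) 1).foldl
    (fun res i => PySem.Int.floordiv (res * (n + i - 1)) i) 1

-- ===== PRECONDITION & SPEC =====
-- Pre_ab excludes k < 0 or n < 0, on which A raises IndexError (the table has no row k / no column n).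
def Pre_ab (k : Int) (n : Int) : Prop := 0 ≤ k ∧ 0 ≤ n
instance (k : Int) (n : Int) : Decidable (Pre_ab k n) := by unfold Pre_ab; infer_instance
def pvWitness_ab : Int × Int := (2, 3)

def Spec_ab (k : Int) (n : Int) (out : Int) : Prop := out = ab_alt k n
instance (k : Int) (n : Int) (out : Int) : Decidable (Spec_ab k n out) := by unfold Spec_ab; infer_instance

-- ===== CLAIM (what is proved, stated in full; the proofs are below) =====
def Claim_equal_ab : Prop := ∀ (k : Int) (n : Int), Dom_ab k n → Pre_ab k n → Spec_ab k n (ab k n)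

-- ===== LEMMAS AND PROOFS =====

-- list-level model of the table (proof-side only): the same operations on List (List Int)
def labGet (tbl : List (List Int)) (j i : Int) : Int :=
  (tbl.getD j.toNat []).getD i.toNat 0

def labSet (tbl : List (List Int)) (j i : Int) (v : Int) : List (List Int) :=
  tbl.set j.toNat ((tbl.getD j.toNat []).set i.toNat v)

def conv (t : Array (Array Int)) : List (List Int) := t.toList.map Array.toList

theorem conv_getD (t : Array (Array Int)) (j : Nat) :
    (conv t).getD j [] = (t.getD j #[]).toList := by
  unfold conv
  rw [List.getD_eq_getElem?_getD, List.getElem?_map, Array.getElem?_toList]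
  by_cases h : j < t.size
  · rw [Array.getElem?_eq_getElem h]
    simp [Array.getD, h]
  · rw [Array.getElem?_eq_none (by omega)]
    simp [Array.getD, h]

theorem arr_getD_toList (a : Array Int) (i : Nat) (d : Int) :
    a.getD i d = a.toList.getD i d := by
  rw [List.getD_eq_getElem?_getD, Array.getElem?_toList]
  by_cases h : i < a.size
  · rw [Array.getElem?_eq_getElem h]
    simp [Array.getD, h]
  · rw [Array.getElem?_eq_none (by omega)]
    simp [Array.getD, h]

theorem abGet_conv (t : Array (Array Int)) (j i : Int) :
    abGet t j i = labGet (conv t) j i := by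
  unfold abGet labGet
  rw [conv_getD, arr_getD_toList]

theorem conv_abSet (t : Array (Array Int)) (j i : Int) (v : Int) :
    conv (abSet t j i v) = labSet (conv t) j i v := by
  unfold abSet labSet
  apply List.ext_getElem?
  intro idx
  rw [List.getElem?_set]
  simp only [conv, List.getElem?_map, Array.getElem?_toList, Array.getElem?_modify]
  by_cases hidx : j.toNat = idx
  · subst hidx
    by_cases h : j.toNat < t.size
    · rw [if_pos rfl, if_pos rfl, if_pos (by simpa using h), Array.getElem?_eq_getElem h]
      simp only [Option.map_some]
      rw [Array.toList_setIfInBounds]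
      congr 1
      rw [show (List.map Array.toList t.toList) = conv t from rfl, conv_getD]
      simp [Array.getD, h]
    · rw [if_pos rfl, if_pos rfl, if_neg (by simpa using h), Array.getElem?_eq_none (by omega)]
      simp
  · rw [if_neg hidx, if_neg hidx]

theorem sim_row0 (L : List Int) : ∀ t, conv (L.foldl (fun t i => abSet t 0 i i) t)
    = L.foldl (fun t i => labSet t 0 i i) (conv t) := by
  induction L with
  | nil => intro t; rfl
  | cons x L ih =>
      intro t
      simp only [List.foldl_cons]
      rw [ih, conv_abSet]

theorem sim_inner (M : List Int) (j : Int) :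
    ∀ t, conv (M.foldl (fun t i => abSet t j i (abGet t j (i-1) + abGet t (j-1) i)) t)
    = M.foldl (fun t i => labSet t j i (labGet t j (i-1) + labGet t (j-1) i)) (conv t) := by
  induction M with
  | nil => intro t; rfl
  | cons x M ih =>
      intro t
      simp only [List.foldl_cons]
      rw [ih, conv_abSet, abGet_conv, abGet_conv]

theorem sim_outer (L M : List Int) :
    ∀ t, conv (L.foldl (fun t j => M.foldl
        (fun t i => abSet t j i (abGet t j (i-1) + abGet t (j-1) i)) t) t)
    = L.foldl (fun t j => M.foldl
        (fun t i => labSet t j i (labGet t j (i-1) + labGet t (j-1) i)) t) (conv t) := by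
  induction L with
  | nil => intro t; rfl
  | cons x L ih =>
      intro t
      simp only [List.foldl_cons]
      rw [ih, sim_inner]

theorem conv_t0 (k n : Int) :
    conv (((PySem.List.pyRange 0 (k+1) 1).map
        (fun _ => Array.replicate (n+1).toNat (0:Int))).toArray)
    = (PySem.List.pyRange 0 (k+1) 1).map (fun _ => List.replicate (n+1).toNat (0:Int)) := by
  unfold conv
  rw [List.toList_toArray, List.map_map]
  exact List.map_congr_left (by intro a _; simp)


-- the finished row j of the table (columns 0..N): entry i is C(i+j, j+1)
def grow (N j : Nat) : List Int := (List.range (N+1)).map (fun t => ((t + j).choose (j+1) : Int))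

-- row j after the inner loop has processed columns 1..i (columns i+1..N still zero)
def prow (j N i : Nat) : List Int :=
  (List.range (i+1)).map (fun t => ((t + j).choose (j+1) : Int)) ++ List.replicate (N - i) 0

-- the table after the outer loop has finished rows 1..j
def tstate (K N j : Nat) : List (List Int) :=
  (List.range (j+1)).map (fun r => grow N r) ++ List.replicate (K - j) (List.replicate (N+1) 0)

theorem prow_last (j N : Nat) : prow j N N = grow N j := by
  simp [prow, grow]

-- small getD helpers
theorem getD_set_self {α : Type} (l : List α) (a d : α) (i : Nat) (h : i < l.length) :
    (l.set i a).getD i d = a := by simp [List.getD, List.getElem?_set_self h]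

theorem getD_set_ne {α : Type} (l : List α) (a d : α) (i j : Nat) (h : i ≠ j) :
    (l.set i a).getD j d = l.getD j d := by simp [List.getD, List.getElem?_set_ne h]

theorem getD_map_range {α : Type} (f : Nat → α) (d : α) (m t : Nat) (h : t < m) :
    ((List.range m).map f).getD t d = f t := by simp [List.getD, h]

theorem getD_append_lt {α : Type} (l l' : List α) (d : α) (n : Nat) (h : n < l.length) :
    (l ++ l').getD n d = l.getD n d := List.getD_append _ _ _ _ h

theorem map_const_replicate {α β : Type} (l : List α) (c : β) :
    l.map (fun _ => c) = List.replicate l.length c := by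
  induction l with
  | nil => rfl
  | cons x l ih => simp [ih, List.replicate_succ]

-- setting the cell just past the filled prefix extends the prefix
theorem prow_set (j N i : Nat) (hi : i < N) :
    (prow j N i).set (i+1) ((i+1 + j).choose (j+1) : Int) = prow j N (i+1) := by
  unfold prow
  have hlen : ((List.range (i+1)).map (fun t => ((t + j).choose (j+1) : Int))).length = i + 1 := by
    simp
  have hrep : N - i = (N - (i+1)) + 1 := by omega
  rw [List.set_append, if_neg (by omega), hlen, Nat.sub_self, hrep, List.replicate_succ,
    List.set_cons_zero]
  have hr : (List.range (i+1+1)).map (fun t => ((t + j).choose (j+1) : Int))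
      = (List.range (i+1)).map (fun t => ((t + j).choose (j+1) : Int))
        ++ [((i+1 + j).choose (j+1) : Int)] := by
    rw [List.range_succ, List.map_append]; simp
  rw [hr, List.append_assoc]; simp

-- ---- B side ----

theorem bstep_zero (L : List Int) :
    L.foldl (fun res i => PySem.Int.floordiv (res * ((0:Int) + i - 1)) i) 0 = 0 := by
  induction L with
  | nil => rfl
  | cons x L ih => simpa [PySem.Int.floordiv] using ih

theorem bloop_zero (j : Nat) :
    (PySem.List.pyRange 1 ((j:Int)+2) 1).foldl
      (fun res i => PySem.Int.floordiv (res * ((0:Int) + i - 1)) i) 1 = 0 := by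
  rw [PySem.List.pyRange_one_cons (by omega)]
  simp only [List.foldl_cons]
  have h1 : PySem.Int.floordiv ((1:Int) * ((0:Int) + 1 - 1)) 1 = 0 := by decide
  rw [h1, bstep_zero]

theorem bloop_pos (m : Nat) : ∀ j : Nat,
    (PySem.List.pyRange 1 ((j:Int)+1) 1).foldl
      (fun res i => PySem.Int.floordiv (res * (((m:Int)+1) + i - 1)) i) 1
    = ((m + j).choose j : Int) := by
  intro j
  induction j with
  | zero => simp [PySem.List.pyRange_one_eq_nil]
  | succ j ih =>
      have hcast : (((j+1:Nat)):Int) + 1 = ((j:Int)+1) + 1 := by push_cast; ring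
      rw [hcast, PySem.List.pyRange_one_succ_right (by omega : (1:Int) ≤ (j:Int)+1),
        List.foldl_append, ih]
      simp only [List.foldl_cons, List.foldl_nil]
      have hnat : (m+j+1) * (m+j).choose j = (m+j+1).choose (j+1) * (j+1) := by
        simpa using Nat.add_one_mul_choose_eq (m+j) j
      have harg : ((m + j).choose j : Int) * (((m:Int)+1) + ((j:Int)+1) - 1)
          = ((m+j+1).choose (j+1) : Int) * ((j:Int)+1) := by
        have hcastn : ((m+j+1) * (m+j).choose j : Int)
            = ((m+j+1).choose (j+1) * (j+1) : Int) := by exact_mod_cast hnat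
        push_cast at hcastn ⊢
        linarith [hcastn]
      rw [harg, PySem.Int.floordiv_eq_ediv_of_pos (by omega : (0:Int) < (j:Int)+1),
        Int.mul_ediv_cancel _ (by omega : ((j:Int)+1) ≠ 0)]
      have hfin : m + j + 1 = m + (j+1) := by omega
      rw [hfin]

theorem alt_eq (k n : Int) (hk : 0 ≤ k) (hn : 0 ≤ n) :
    ab_alt k n = ((n.toNat + k.toNat).choose (k.toNat + 1) : Int) := by
  unfold ab_alt
  by_cases h0 : n = 0
  · subst h0
    have hk2 : k + 2 = ((k.toNat : Int)) + 2 := by omega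
    rw [hk2, bloop_zero k.toNat]
    have : (0:Int).toNat + k.toNat = k.toNat := by omega
    rw [this, Nat.choose_eq_zero_of_lt (by omega)]
    rfl
  · have hn1 : (1:Int) ≤ n := by omega
    have hnform : n = ((n.toNat - 1 : Nat) : Int) + 1 := by omega
    have hk2 : k + 2 = (((k.toNat + 1 : Nat)) : Int) + 1 := by push_cast; omega
    rw [hnform, hk2, bloop_pos (n.toNat - 1) (k.toNat + 1)]
    congr 2
    omega

-- ---- A side ----

-- the first loop only ever touches row 0: it factors into a fold on that row
theorem foldl_row0 (L : List Int) : ∀ (t : List (List Int)), 0 < t.length →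
    L.foldl (fun t i => labSet t 0 i i) t
      = t.set 0 (L.foldl (fun cur i => cur.set i.toNat i) (t.getD 0 [])) := by
  induction L with
  | nil =>
      intro t ht
      simp only [List.foldl_nil, List.getD]
      rw [List.getElem?_eq_getElem ht]
      simp
  | cons x L ih =>
      intro t ht
      simp only [List.foldl_cons]
      have habs : labSet t 0 x x = t.set 0 ((t.getD 0 []).set x.toNat x) := by
        simp [labSet]
      rw [habs, ih _ (by simpa using ht),
        getD_set_self _ _ _ _ (by simpa using ht), List.set_set]

-- the inner loop for row J (J ≥ 1) only touches row J and reads the frozen row J-1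
theorem foldl_rowJ (J : Nat) (hJ : 1 ≤ J) (L : List Int) : ∀ (t : List (List Int)),
    J < t.length →
    L.foldl (fun t i => labSet t (J:Int) i (labGet t (J:Int) (i-1) + labGet t ((J:Int)-1) i)) t
      = t.set J (L.foldl
          (fun cur i => cur.set i.toNat (cur.getD (i-1).toNat 0 + (t.getD (J-1) []).getD i.toNat 0))
          (t.getD J [])) := by
  induction L with
  | nil =>
      intro t ht
      simp only [List.foldl_nil, List.getD]
      rw [List.getElem?_eq_getElem ht]
      simp
  | cons x L ih =>
      intro t ht
      simp only [List.foldl_cons]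
      have hJt : ((J:Int)).toNat = J := by omega
      have hJ1 : (((J:Int)) - 1).toNat = J - 1 := by omega
      have habs : labSet t (J:Int) x (labGet t (J:Int) (x-1) + labGet t ((J:Int)-1) x)
          = t.set J ((t.getD J []).set x.toNat
              ((t.getD J []).getD (x-1).toNat 0 + (t.getD (J-1) []).getD x.toNat 0)) := by
        simp [labSet, labGet, hJt, hJ1]
      rw [habs, ih _ (by simpa using ht),
        getD_set_ne _ _ _ _ _ (by omega : J ≠ J - 1),
        getD_set_self _ _ _ _ (by simpa using ht), List.set_set]

-- row 0 after columns 1..i are written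
theorem row0_fill (N : Nat) : ∀ i, i ≤ N →
    (PySem.List.pyRange 1 ((i:Int)+1) 1).foldl (fun cur x => cur.set x.toNat x)
      (List.replicate (N+1) 0) = prow 0 N i := by
  intro i
  induction i with
  | zero =>
      intro _
      rw [PySem.List.pyRange_one_eq_nil (by omega)]
      simp [prow, List.replicate_succ]
  | succ i ih =>
      intro hi
      have hcast : (((i+1:Nat)):Int) + 1 = ((i:Int)+1) + 1 := by push_cast; ring
      rw [hcast, PySem.List.pyRange_one_succ_right (by omega : (1:Int) ≤ (i:Int)+1),
        List.foldl_append, ih (by omega)]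
      simp only [List.foldl_cons, List.foldl_nil]
      have htn : (((i:Int))+1).toNat = i + 1 := by omega
      rw [htn]
      have hv : ((i:Int)+1) = ((i+1 + 0).choose (0+1) : Int) := by
        simp [Nat.choose_one_right]
      rw [hv]
      exact prow_set 0 N i (by omega)

-- row j+1 after columns 1..i are written, reading the finished row j
theorem rowJ_fill (N j : Nat) : ∀ i, i ≤ N →
    (PySem.List.pyRange 1 ((i:Int)+1) 1).foldl
      (fun cur x => cur.set x.toNat (cur.getD (x-1).toNat 0 + (grow N j).getD x.toNat 0))
      (List.replicate (N+1) 0) = prow (j+1) N i := by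
  intro i
  induction i with
  | zero =>
      intro _
      rw [PySem.List.pyRange_one_eq_nil (by omega)]
      simp [prow, List.replicate_succ]
  | succ i ih =>
      intro hi
      have hcast : (((i+1:Nat)):Int) + 1 = ((i:Int)+1) + 1 := by push_cast; ring
      rw [hcast, PySem.List.pyRange_one_succ_right (by omega : (1:Int) ≤ (i:Int)+1),
        List.foldl_append, ih (by omega)]
      simp only [List.foldl_cons, List.foldl_nil]
      have htn : (((i:Int))+1).toNat = i + 1 := by omega
      have htn' : (((i:Int))+1-1).toNat = i := by omega
      rw [htn, htn']
      have hcur : (prow (j+1) N i).getD i 0 = ((i + (j+1)).choose (j+2) : Int) := by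
        unfold prow
        rw [getD_append_lt _ _ _ _ (by simp), getD_map_range _ _ _ _ (by omega)]
      have hprev : (grow N j).getD (i+1) 0 = ((i+1 + j).choose (j+1) : Int) := by
        unfold grow
        rw [getD_map_range _ _ _ _ (by omega)]
      rw [hcur, hprev]
      have hpascal : ((i + (j+1)).choose (j+2) : Int) + ((i+1 + j).choose (j+1) : Int)
          = ((i+1 + (j+1)).choose ((j+1)+1) : Int) := by
        have h := Nat.choose_succ_succ (i+j+1) (j+1)
        have h1 : i + (j+1) = i+j+1 := by omega
        have h2 : i+1 + j = i+j+1 := by omega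
        have h3 : i+1 + (j+1) = (i+j+1) + 1 := by omega
        rw [h1, h2, h3, h]
        push_cast
        ring
      rw [hpascal]
      exact prow_set (j+1) N i (by omega)

theorem tstate_getD_le (K N j r : Nat) (h : r ≤ j) :
    (tstate K N j).getD r [] = grow N r := by
  unfold tstate
  rw [getD_append_lt _ _ _ _ (by simp; omega), getD_map_range _ _ _ _ (by omega)]

theorem tstate_getD_succ (K N j : Nat) (h : j < K) :
    (tstate K N j).getD (j+1) [] = List.replicate (N+1) 0 := by
  unfold tstate
  have hlen : ((List.range (j+1)).map (fun r => grow N r)).length = j + 1 := by simp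
  rw [List.getD_eq_getElem?_getD, List.getElem?_append_right (by simp), hlen]
  have : j + 1 - (j+1) = 0 := by omega
  rw [this]
  have hrep : K - j = (K - (j+1)) + 1 := by omega
  simp [hrep, List.replicate_succ]

theorem tstate_set (K N j : Nat) (h : j < K) :
    (tstate K N j).set (j+1) (grow N (j+1)) = tstate K N (j+1) := by
  unfold tstate
  have hlen : ((List.range (j+1)).map (fun r => grow N r)).length = j + 1 := by simp
  rw [List.set_append, if_neg (by omega), hlen]
  have : j + 1 - (j+1) = 0 := by omega
  rw [this]
  have hrep : K - j = (K - (j+1)) + 1 := by omega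
  rw [hrep, List.replicate_succ, List.set_cons_zero]
  have hr : (List.range (j+1+1)).map (fun r => grow N r)
      = (List.range (j+1)).map (fun r => grow N r) ++ [grow N (j+1)] := by
    rw [List.range_succ, List.map_append]; simp
  rw [hr, List.append_assoc]; simp

theorem tstate_length (K N j : Nat) (h : j ≤ K) : (tstate K N j).length = K + 1 := by
  unfold tstate
  simp
  omega


-- outer loop invariant
theorem outer (K N : Nat) : ∀ j, j ≤ K →
    (PySem.List.pyRange 1 ((j:Int)+1) 1).foldl
      (fun t jj => (PySem.List.pyRange 1 ((N:Int)+1) 1).foldl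
        (fun t i => labSet t jj i (labGet t jj (i-1) + labGet t (jj-1) i)) t)
      (tstate K N 0) = tstate K N j := by
  intro j
  induction j with
  | zero =>
      intro _
      have h0 : PySem.List.pyRange 1 ((((0:Nat)):Int)+1) 1 = [] :=
        PySem.List.pyRange_one_eq_nil (by omega)
      rw [h0]
      rfl
  | succ j ih =>
      intro hj
      have hcast : (((j+1:Nat)):Int) + 1 = ((j:Int)+1) + 1 := by push_cast; ring
      rw [hcast, PySem.List.pyRange_one_succ_right (by omega : (1:Int) ≤ (j:Int)+1),
        List.foldl_append, ih (by omega)]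
      simp only [List.foldl_cons, List.foldl_nil]
      have hjj : ((j:Int)+1) = (((j+1:Nat)):Int) := by push_cast; ring
      rw [hjj, foldl_rowJ (j+1) (by omega) _ _
        (by rw [tstate_length K N j (by omega)]; omega)]
      rw [show (j + 1 - 1) = j from by omega, tstate_getD_le K N j j (by omega),
        tstate_getD_succ K N j (by omega)]
      rw [rowJ_fill N j N (by omega), prow_last]
      exact tstate_set K N j (by omega)

theorem ab_eq (k n : Int) (hk : 0 ≤ k) (hn : 0 ≤ n) :
    ab k n = ((n.toNat + k.toNat).choose (k.toNat + 1) : Int) := by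
  simp only [ab]
  rw [abGet_conv, sim_outer, sim_row0, conv_t0]
  have hkc : k = ((k.toNat : Nat) : Int) := by omega
  have hnc : n = ((n.toNat : Nat) : Int) := by omega
  rw [hkc, hnc]
  set K := k.toNat with hK
  set N := n.toNat with hN
  -- the initial table is a (K+1) × (N+1) block of zeros
  have ht0 : (PySem.List.pyRange 0 ((K:Int)+1) 1).map
        (fun _ => List.replicate (((N:Int)+1)).toNat (0:Int))
      = List.replicate (K+1) (List.replicate (N+1) 0) := by
    rw [map_const_replicate, PySem.List.length_pyRange_one]
    congr 1
  rw [ht0]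
  -- the first loop produces tstate K N 0
  have ht1 : (PySem.List.pyRange 1 ((N:Int)+1) 1).foldl (fun t i => labSet t 0 i i)
        (List.replicate (K+1) (List.replicate (N+1) 0)) = tstate K N 0 := by
    rw [foldl_row0 _ _ (by simp)]
    have hg : (List.replicate (K+1) (List.replicate (N+1) (0:Int))).getD 0 [] =
        List.replicate (N+1) 0 := by simp [List.getD]
    rw [hg, row0_fill N N (by omega), prow_last]
    unfold tstate
    simp [List.replicate_succ, List.range_succ, grow]
  rw [ht1, outer K N K (by omega)]
  unfold labGet
  rw [show ((K:Int)).toNat = K from by omega, show ((N:Int)).toNat = N from by omega,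
    tstate_getD_le K N K K (by omega)]
  unfold grow
  rw [getD_map_range _ _ _ _ (by omega)]

-- ===== VERDICT (by name: the statement is the Claim_ definition above) =====
theorem ab_spec : Claim_equal_ab := by
  intro k n _ hpre
  unfold Spec_ab
  rw [ab_eq k n hpre.1 hpre.2, alt_eq k n hpre.1 hpre.2]
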